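-- pv_equiv track=rewrite | github.com/iplayfast/ogame | pygame/utils.py | is_footprint_valid
-- ===== SOURCE A (Python) =====
-- def align_to_grid(x, y, tile_size):
--     """Align a position to the grid.
--
--     Args:
--         x, y: Position coordinates
--         tile_size: Size of a tile in pixels
--
--     Returns:
--         Tuple of (x, y) aligned to the grid
--     """
--     grid_x = (x // tile_size) * tile_size
--     grid_y = (y // tile_size) * tile_size
--     return grid_x, grid_y
--
-- def is_in_bounds(x, y, grid_size):
--     """Check if a position is within the grid bounds.
--
--     Args:
--         x, y: Position coordinates
--         grid_size: Size of the grid in pixels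
--
--     Returns:
--         Boolean indicating if the position is in bounds
--     """
--     return 0 <= x < grid_size and 0 <= y < grid_size
--
-- def iterate_area(x, y, width, height, tile_size):
--     """Iterate over all tiles in an area.
--
--     Args:
--         x, y: Top-left corner coordinates
--         width, height: Size of the area in pixels
--         tile_size: Size of a tile in pixels
--
--     Returns:
--         Generator yielding tile positions
--     """
--     x_start, y_start = align_to_grid(x, y, tile_size)
--     x_end = x_start + width
--     y_end = y_start + height
--
--     for tile_y in range(y_start, y_end, tile_size):
--         for tile_x in range(x_start, x_end, tile_size):
--             yield (tile_x, tile_y)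
--
-- def is_footprint_valid(x, y, footprint_tiles, tile_size, excluded_sets, grid_size):
--     """Check if a building footprint is valid.
--
--     Args:
--         x, y: Top-left corner coordinates
--         footprint_tiles: Size of footprint in tiles
--         tile_size: Size of a tile in pixels
--         excluded_sets: List of sets with positions to exclude
--         grid_size: Size of the grid in pixels
--
--     Returns:
--         Boolean indicating if the footprint is valid
--     """
--     # Check all tiles in the building footprint
--     for tile_x, tile_y in iterate_area(x, y, footprint_tiles * tile_size, footprint_tiles * tile_size, tile_size):
--         # Skip if out of bounds
--         if not is_in_bounds(tile_x, tile_y, grid_size):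
--             return False
--
--         # Check if position is in any excluded set
--         pos = (tile_x, tile_y)
--         for excluded_set in excluded_sets:
--             if pos in excluded_set:
--                 return False
--
--     return True
-- ===== SOURCE B (Python) =====
-- def is_footprint_valid(x, y, footprint_tiles, tile_size, excluded_sets, grid_size):
--     """Closed-form bounds check + one disjointness test instead of a per-tile scan."""
--     x_start = (x // tile_size) * tile_size
--     y_start = (y // tile_size) * tile_size
--     if footprint_tiles <= 0:
--         return True
--     last = (footprint_tiles - 1) * tile_size
--     if not (0 <= x_start < grid_size and 0 <= x_start + last < grid_size
--             and 0 <= y_start < grid_size and 0 <= y_start + last < grid_size):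
--         return False
--     footprint = {(x_start + i * tile_size, y_start + j * tile_size)
--                  for i in range(footprint_tiles) for j in range(footprint_tiles)}
--     return all(footprint.isdisjoint(s) for s in excluded_sets)
-- ===== Notes on version B (the rewrite author's own statement) =====
-- stated objective: simpler
-- what changed: Replaced A's per-tile generator loop (bounds test and a scan of every excluded set for every tile) by a closed-form corner bounds check on the aligned footprint rectangle followed by one set-disjointness test per excluded set.
-- outside the precondition, e.g. on is_footprint_valid(0, 0, 2, 0, [], 100): A raises ZeroDivisionError, B raises ZeroDivisionError
import Mathlib
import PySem

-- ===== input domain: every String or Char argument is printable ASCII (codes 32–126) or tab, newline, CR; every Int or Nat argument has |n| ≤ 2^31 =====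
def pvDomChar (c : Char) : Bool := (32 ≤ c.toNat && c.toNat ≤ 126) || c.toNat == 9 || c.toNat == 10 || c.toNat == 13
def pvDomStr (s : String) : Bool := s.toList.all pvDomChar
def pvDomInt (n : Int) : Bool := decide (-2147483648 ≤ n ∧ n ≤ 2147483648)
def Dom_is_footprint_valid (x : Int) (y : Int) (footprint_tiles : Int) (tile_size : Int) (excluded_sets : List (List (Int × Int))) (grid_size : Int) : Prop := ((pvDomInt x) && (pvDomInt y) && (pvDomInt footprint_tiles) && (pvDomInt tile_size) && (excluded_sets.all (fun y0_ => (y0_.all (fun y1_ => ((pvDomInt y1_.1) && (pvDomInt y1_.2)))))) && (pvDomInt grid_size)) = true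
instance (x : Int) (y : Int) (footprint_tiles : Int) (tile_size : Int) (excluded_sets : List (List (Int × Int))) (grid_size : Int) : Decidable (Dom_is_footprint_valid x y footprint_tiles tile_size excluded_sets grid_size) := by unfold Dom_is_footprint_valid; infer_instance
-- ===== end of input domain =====

-- B replaces A's per-tile loop (bounds test + scan of every excluded set for every tile)
-- by a closed-form corner bounds check plus one disjointness test per excluded set (objective: simpler).

-- ===== PORT A =====
-- align_to_grid
def pvAlignToGrid (x y tile_size : Int) : Int × Int :=
  ((PySem.Int.floordiv x tile_size) * tile_size, (PySem.Int.floordiv y tile_size) * tile_size)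

-- is_in_bounds
def pvIsInBounds (x y grid_size : Int) : Bool :=
  (decide (0 ≤ x) && decide (x < grid_size)) && (decide (0 ≤ y) && decide (y < grid_size))

-- iterate_area (the generator, materialised as the list of yielded pairs)
def pvIterateArea (x y width height tile_size : Int) : List (Int × Int) :=
  let p := pvAlignToGrid x y tile_size
  let x_start := p.1
  let y_start := p.2
  let x_end := x_start + width
  let y_end := y_start + height
  (PySem.List.pyRange y_start y_end tile_size).flatMap (fun tile_y =>
    (PySem.List.pyRange x_start x_end tile_size).map (fun tile_x => (tile_x, tile_y)))

-- the for-loop of is_footprint_valid with its early returns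
def pvIfvLoop (grid_size : Int) (excluded_sets : List (List (Int × Int))) :
    List (Int × Int) → Bool
  | [] => true
  | (tile_x, tile_y) :: rest =>
    if !pvIsInBounds tile_x tile_y grid_size then false
    else if excluded_sets.any (fun s => decide ((tile_x, tile_y) ∈ s)) then false
    else pvIfvLoop grid_size excluded_sets rest

def is_footprint_valid (x : Int) (y : Int) (footprint_tiles : Int) (tile_size : Int) (excluded_sets : List (List (Int × Int))) (grid_size : Int) : Bool :=
  pvIfvLoop grid_size excluded_sets
    (pvIterateArea x y (footprint_tiles * tile_size) (footprint_tiles * tile_size) tile_size)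

-- ===== PORT B =====
def is_footprint_valid_alt (x : Int) (y : Int) (footprint_tiles : Int) (tile_size : Int) (excluded_sets : List (List (Int × Int))) (grid_size : Int) : Bool :=
  let x_start := (PySem.Int.floordiv x tile_size) * tile_size
  let y_start := (PySem.Int.floordiv y tile_size) * tile_size
  if footprint_tiles ≤ 0 then true
  else
    let last := (footprint_tiles - 1) * tile_size
    if !((decide (0 ≤ x_start) && decide (x_start < grid_size)) &&
         (decide (0 ≤ x_start + last) && decide (x_start + last < grid_size)) &&
         (decide (0 ≤ y_start) && decide (y_start < grid_size)) &&
         (decide (0 ≤ y_start + last) && decide (y_start + last < grid_size))) then false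
    else
      let footprint : PySem.Set (Int × Int) :=
        PySem.Set.ofList ((List.range footprint_tiles.toNat).flatMap (fun i : Nat =>
          (List.range footprint_tiles.toNat).map (fun j : Nat =>
            (x_start + (i : Int) * tile_size, y_start + (j : Int) * tile_size))))
      excluded_sets.all (fun s => PySem.Set.isdisjoint footprint s)

-- ===== PRECONDITION & SPEC =====
-- tile_size = 0 makes A raise ZeroDivisionError (and B too); nothing else is excluded.
def Pre_is_footprint_valid (x : Int) (y : Int) (footprint_tiles : Int) (tile_size : Int) (excluded_sets : List (List (Int × Int))) (grid_size : Int) : Prop := tile_size ≠ 0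
instance (x : Int) (y : Int) (footprint_tiles : Int) (tile_size : Int) (excluded_sets : List (List (Int × Int))) (grid_size : Int) : Decidable (Pre_is_footprint_valid x y footprint_tiles tile_size excluded_sets grid_size) := by unfold Pre_is_footprint_valid; infer_instance

def pvWitness_is_footprint_valid : Int × Int × Int × Int × (List (List (Int × Int))) × Int :=
  (0, 0, 2, 10, [[(50, 50)]], 100)

def Spec_is_footprint_valid (x : Int) (y : Int) (footprint_tiles : Int) (tile_size : Int) (excluded_sets : List (List (Int × Int))) (grid_size : Int) (out : Bool) : Prop := out = is_footprint_valid_alt x y footprint_tiles tile_size excluded_sets grid_size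
instance (x : Int) (y : Int) (footprint_tiles : Int) (tile_size : Int) (excluded_sets : List (List (Int × Int))) (grid_size : Int) (out : Bool) : Decidable (Spec_is_footprint_valid x y footprint_tiles tile_size excluded_sets grid_size out) := by unfold Spec_is_footprint_valid; infer_instance

-- ===== CLAIM (what is proved, stated in full; the proofs are below) =====
def Claim_equal_is_footprint_valid : Prop := ∀ (x : Int) (y : Int) (footprint_tiles : Int) (tile_size : Int) (excluded_sets : List (List (Int × Int))) (grid_size : Int), Dom_is_footprint_valid x y footprint_tiles tile_size excluded_sets grid_size → Pre_is_footprint_valid x y footprint_tiles tile_size excluded_sets grid_size → Spec_is_footprint_valid x y footprint_tiles tile_size excluded_sets grid_size (is_footprint_valid x y footprint_tiles tile_size excluded_sets grid_size)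

-- ===== LEMMAS AND PROOFS =====

-- range(s, s + f*t, t) is exactly the f aligned steps, for any t ≠ 0
theorem pyRange_step_count (s f t : Int) (ht : t ≠ 0) :
    PySem.List.pyRange s (s + f * t) t
      = (List.range f.toNat).map (fun k : Nat => s + t * (k : Int)) := by
  unfold PySem.List.pyRange
  rw [if_neg ht]
  rcases Int.lt_or_le 0 t with htp | htn
  · rw [if_pos htp]
    by_cases hf : 0 < f
    · rw [if_pos (by nlinarith)]
      have he : s + f * t - s + t - 1 = (t - 1) + f * t := by ring
      rw [he, Int.add_mul_ediv_right _ _ ht, Int.ediv_eq_zero_of_lt (by omega) (by omega)]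
      rw [Int.zero_add]
    · rw [if_neg (by nlinarith)]
      simp [Int.toNat_of_nonpos (by omega : f ≤ 0)]
  · have htn' : t < 0 := lt_of_le_of_ne htn ht
    rw [if_neg (by omega)]
    by_cases hf : 0 < f
    · rw [if_pos (by nlinarith)]
      have he : s - (s + f * t) + -t - 1 = (-t - 1) + f * -t := by ring
      rw [he, Int.add_mul_ediv_right _ _ (by omega : -t ≠ 0),
        Int.ediv_eq_zero_of_lt (by omega) (by omega)]
      rw [Int.zero_add]
    · rw [if_neg (by nlinarith)]
      simp [Int.toNat_of_nonpos (by omega : f ≤ 0)]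

-- the loop with early returns is an 'all'
theorem pvIfvLoop_eq_all (g : Int) (ex : List (List (Int × Int))) (ts : List (Int × Int)) :
    pvIfvLoop g ex ts
      = ts.all (fun p => pvIsInBounds p.1 p.2 g && !(ex.any (fun s => decide (p ∈ s)))) := by
  induction ts with
  | nil => rfl
  | cons p rest ih =>
    obtain ⟨tx, ty⟩ := p
    simp only [pvIfvLoop, List.all_cons, ih]
    by_cases h1 : pvIsInBounds tx ty g <;>
      by_cases h2 : ex.any (fun s => decide ((tx, ty) ∈ s)) <;>
        simp [h1, h2]

-- a whole arithmetic progression is inside [0, g) iff its two end points are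
theorem bounds_iff (s g t f : Int) (hf : 0 < f) :
    (∀ i : Int, 0 ≤ i → i < f → 0 ≤ s + t * i ∧ s + t * i < g)
      ↔ (0 ≤ s ∧ s < g ∧ 0 ≤ s + (f - 1) * t ∧ s + (f - 1) * t < g) := by
  constructor
  · intro h
    have h0 := h 0 le_rfl hf
    have h1 := h (f - 1) (by omega) (by omega)
    exact ⟨by nlinarith [h0.1], by nlinarith [h0.2], by nlinarith [h1.1], by nlinarith [h1.2]⟩
  · rintro ⟨ha, hb, hc, hd⟩ i hi0 hif
    rcases Int.lt_or_le t 0 with htn | htp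
    · exact ⟨by nlinarith, by nlinarith⟩
    · exact ⟨by nlinarith, by nlinarith⟩

theorem allA_iff (xs ys g t : Int) (n : Nat) (ex : List (List (Int × Int))) :
    (((List.range n).map (fun k : Nat => ys + t * (k : Int))).flatMap (fun tile_y =>
        ((List.range n).map (fun k : Nat => xs + t * (k : Int))).map (fun tile_x => (tile_x, tile_y)))).all
      (fun p => pvIsInBounds p.1 p.2 g && !ex.any fun s => decide (p ∈ s)) = true
    ↔ ∀ i < n, ∀ j < n,
        ((0 ≤ xs + t * (i : Int) ∧ xs + t * (i : Int) < g) ∧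
         (0 ≤ ys + t * (j : Int) ∧ ys + t * (j : Int) < g)) ∧
        ∀ s ∈ ex, (xs + t * (i : Int), ys + t * (j : Int)) ∉ s := by
  simp only [List.all_eq_true, List.mem_flatMap, List.mem_map, List.mem_range, pvIsInBounds,
    Bool.and_eq_true, decide_eq_true_eq, Bool.not_eq_true', List.any_eq_false]
  constructor
  · intro h i hi j hj
    exact h _ ⟨_, ⟨j, hj, rfl⟩, _, ⟨i, hi, rfl⟩, rfl⟩
  · rintro h a ⟨ty, ⟨j, hj, rfl⟩, tx, ⟨i, hi, rfl⟩, rfl⟩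
    exact h i hi j hj

theorem allB_iff (xs ys t : Int) (n : Nat) (ex : List (List (Int × Int))) :
    (ex.all fun s =>
      (PySem.Set.ofList ((List.range n).flatMap (fun i : Nat =>
        (List.range n).map (fun j : Nat =>
          (xs + (i : Int) * t, ys + (j : Int) * t))))).isdisjoint s) = true
    ↔ ∀ s ∈ ex, ∀ i < n, ∀ j < n, (xs + (i : Int) * t, ys + (j : Int) * t) ∉ s := by
  simp only [List.all_eq_true, PySem.Set.isdisjoint_iff, PySem.Set.mem_ofList, List.mem_flatMap,
    List.mem_map, List.mem_range]
  constructor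
  · intro h s hs i hi j hj
    exact h s hs _ ⟨i, hi, j, hj, rfl⟩
  · rintro h s hs p ⟨i, hi, j, hj, rfl⟩
    exact h s hs i hi j hj

theorem is_footprint_valid_eq (x y f t : Int) (ex : List (List (Int × Int))) (g : Int)
    (ht : t ≠ 0) :
    is_footprint_valid x y f t ex g = is_footprint_valid_alt x y f t ex g := by
  unfold is_footprint_valid is_footprint_valid_alt pvIterateArea pvAlignToGrid
  simp only [pvIfvLoop_eq_all, pyRange_step_count _ _ _ ht]
  by_cases hf : f ≤ 0
  · simp [hf, Int.toNat_of_nonpos hf]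
  · rw [if_neg hf]
    generalize PySem.Int.floordiv x t * t = xs
    generalize PySem.Int.floordiv y t * t = ys
    have hbx := bounds_iff xs g t f (by omega)
    have hby := bounds_iff ys g t f (by omega)
    split_ifs with hb
    · simp only [Bool.not_eq_true', Bool.and_eq_false_iff, decide_eq_false_iff_not] at hb
      rw [Bool.eq_false_iff]
      intro hA
      rw [allA_iff] at hA
      have HX : ∀ i : Int, 0 ≤ i → i < f → 0 ≤ xs + t * i ∧ xs + t * i < g := by
        intro i hi0 hif
        have h := (hA i.toNat (by omega) 0 (by omega)).1.1
        have hc : ((i.toNat : Int)) = i := by omega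
        rwa [hc] at h
      have HY : ∀ i : Int, 0 ≤ i → i < f → 0 ≤ ys + t * i ∧ ys + t * i < g := by
        intro i hi0 hif
        have h := (hA 0 (by omega) i.toNat (by omega)).1.2
        have hc : ((i.toNat : Int)) = i := by omega
        rwa [hc] at h
      have PX := hbx.mp HX
      have PY := hby.mp HY
      omega
    · simp only [Bool.not_eq_true', Bool.not_eq_false, Bool.and_eq_true, decide_eq_true_eq] at hb
      rw [Bool.eq_iff_iff, allA_iff, allB_iff]
      constructor
      · intro hA s hs i hi j hj
        have h := (hA i hi j hj).2 s hs
        simpa [mul_comm] using h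
      · intro hB i hi j hj
        refine ⟨⟨?_, ?_⟩, ?_⟩
        · exact hbx.mpr (by tauto) (i : Int) (by omega) (by omega)
        · exact hby.mpr (by tauto) (j : Int) (by omega) (by omega)
        · intro s hs
          have h := hB s hs i hi j hj
          simpa [mul_comm] using h

-- ===== VERDICT (by name: the statement is the Claim_ definition above) =====
theorem is_footprint_valid_spec : Claim_equal_is_footprint_valid := by
  intro x y f t ex g _ hpre
  unfold Spec_is_footprint_valid
  exact is_footprint_valid_eq x y f t ex g hpre
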